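-- pv_equiv track=rewrite | github.com/bseongwook/for_coding_test | 프로그래머스/1/132267. 콜라 문제/콜라 문제.py | solution
-- ===== SOURCE A (Python) =====
-- def solution(a, b, n):
--     answer = 0
--
--     while n >= a:
--
--         temp_n = n
--         n = (temp_n // a) * b
--
--         answer += n
--
--         n += temp_n % a
--
--
--
--     return answer
-- ===== SOURCE B (Python) =====
-- def solution(a, b, n):
--     # Closed form: each exchange of a empties yields b colas; the total
--     # gained is ((n - b) // (a - b)) * b once any exchange is possible.
--     if n < a:
--         return 0
--     return (n - b) // (a - b) * b
-- ===== Notes on version B (the rewrite author's own statement) =====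
-- stated objective: simpler
-- what changed: Replaces the exchange-simulation while-loop with the closed form ((n-b)//(a-b))*b (0 when n < a).
-- outside the precondition, e.g. on solution(1, -6, 2): A returns -12, B returns -6
import Mathlib
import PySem

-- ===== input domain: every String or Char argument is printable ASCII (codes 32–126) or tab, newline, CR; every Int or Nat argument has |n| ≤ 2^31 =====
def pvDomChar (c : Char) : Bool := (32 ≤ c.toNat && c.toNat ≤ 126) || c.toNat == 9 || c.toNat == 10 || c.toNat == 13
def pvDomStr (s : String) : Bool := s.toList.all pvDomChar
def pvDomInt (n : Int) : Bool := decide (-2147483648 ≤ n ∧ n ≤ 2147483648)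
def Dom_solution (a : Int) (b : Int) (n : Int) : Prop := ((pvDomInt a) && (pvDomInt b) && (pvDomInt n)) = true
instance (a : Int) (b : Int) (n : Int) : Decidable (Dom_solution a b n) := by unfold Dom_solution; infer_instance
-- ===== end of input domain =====

-- B replaces A's exchange-simulation loop with the closed form ((n-b)//(a-b))*b (simpler, loop-free).


-- ===== PORT A =====
-- A's while-loop, fuel-bounded; under Pre_solution the loop body strictly
-- decreases n (by at least a-b ≥ 1 per iteration while n ≥ a ≥ 1), so fuel
-- n.toNat + 1 always suffices and the port computes exactly what A computes.
def solutionLoop (a : Int) (b : Int) : Nat → Int → Int → Int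
  | 0, _, answer => answer
  | fuel + 1, n, answer =>
      if a ≤ n then
        let temp_n := n
        let n1 := (PySem.Int.floordiv temp_n a) * b
        let answer1 := answer + n1
        let n2 := n1 + PySem.Int.mod temp_n a
        solutionLoop a b fuel n2 answer1
      else answer

def solution (a : Int) (b : Int) (n : Int) : Int :=
  solutionLoop a b (n.toNat + 1) n 0

-- ===== PORT B =====
def solution_alt (a : Int) (b : Int) (n : Int) : Int :=
  if n < a then 0 else (PySem.Int.floordiv (n - b) (a - b)) * b

-- ===== PRECONDITION & SPEC =====
-- Pre_ restricts to the problem's natural domain 0 ≤ b < a (a bottles buy b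
-- colas), plus all inputs whose loop never runs (n < a, where A returns 0).
-- Excluded inputs where A still returns: negative b with n ≥ a > 0, a
-- meaningless exchange rate on which A's loop value is accidental.
def Pre_solution (a : Int) (b : Int) (n : Int) : Prop :=
  n < a ∨ (0 ≤ b ∧ b < a)
instance (a : Int) (b : Int) (n : Int) : Decidable (Pre_solution a b n) := by unfold Pre_solution; infer_instance
def pvWitness_solution : Int × Int × Int := (3, 1, 20)

def Spec_solution (a : Int) (b : Int) (n : Int) (out : Int) : Prop := out = solution_alt a b n
instance (a : Int) (b : Int) (n : Int) (out : Int) : Decidable (Spec_solution a b n out) := by unfold Spec_solution; infer_instance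

-- ===== CLAIM (what is proved, stated in full; the proofs are below) =====
def Claim_equal_solution : Prop := ∀ (a : Int) (b : Int) (n : Int), Dom_solution a b n → Pre_solution a b n → Spec_solution a b n (solution a b n)

-- ===== LEMMAS AND PROOFS =====

-- the closed form, written with ediv (valid divisor a - b > 0)
def gForm (a : Int) (b : Int) (n : Int) : Int := ((n - b) / (a - b)) * b

-- one loop step of the closed form: for n ≥ a, peeling one exchange round
lemma gForm_step (a b n : Int) (hba : b < a) :
    gForm a b n = (n / a) * b + gForm a b ((n / a) * b + n % a) := by
  have hc : a - b ≠ 0 := by omega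
  have h1 : n - b = ((n / a) * b + n % a - b) + (n / a) * (a - b) := by
    have hn := Int.ediv_add_emod n a
    have hm : a * (n / a) = n / a * a := mul_comm _ _
    ring_nf
    omega
  unfold gForm
  rw [h1, Int.add_mul_ediv_right _ _ hc]
  ring

-- the closed form vanishes below a (given b ≤ n)
lemma gForm_zero (a b n : Int) (hbn : b ≤ n) (hna : n < a) :
    gForm a b n = 0 := by
  unfold gForm
  have : (n - b) / (a - b) = 0 := Int.ediv_eq_zero_of_lt (by omega) (by omega)
  simp [this]

-- loop invariant: with 0 ≤ b < a, b ≤ n and enough fuel, the loop adds gForm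
lemma solutionLoop_eq (a b : Int) (hb : 0 ≤ b) (hba : b < a) :
    ∀ (fuel : Nat) (n answer : Int), b ≤ n → n.toNat < fuel →
      solutionLoop a b fuel n answer = answer + gForm a b n := by
  intro fuel
  induction fuel with
  | zero => intro n answer _ h; omega
  | succ f ih =>
    intro n answer hbn hfuel
    by_cases han : a ≤ n
    · have ha : 0 < a := by omega
      have hq : 1 ≤ n / a := by
        rw [Int.le_ediv_iff_mul_le ha, one_mul]; exact han
      have hr0 : 0 ≤ n % a := Int.emod_nonneg n (by omega)
      have hra : n % a < a := Int.emod_lt_of_pos n ha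
      have hqb : b ≤ (n / a) * b := le_mul_of_one_le_left hb hq
      have hn2lt : (n / a) * b + n % a < n := by
        have := Int.ediv_add_emod n a
        nlinarith [Int.ediv_add_emod n a]
      simp only [solutionLoop, if_pos han,
        PySem.Int.floordiv_eq_ediv_of_pos (b := a) (by omega),
        PySem.Int.mod_eq_emod_of_pos (b := a) (by omega)]
      rw [ih ((n / a) * b + n % a) (answer + (n / a) * b) (by omega) (by omega)]
      rw [gForm_step a b n hba]
      ring
    · simp only [solutionLoop, if_neg han]
      rw [gForm_zero a b n hbn (by omega)]
      ring

-- ===== VERDICT (by name: the statement is the Claim_ definition above) =====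
theorem solution_spec : Claim_equal_solution := by
  intro a b n _ hpre
  unfold Spec_solution solution solution_alt
  by_cases hna : n < a
  · simp [solutionLoop, if_neg (by omega : ¬ a ≤ n), hna]
  · rcases hpre with h | ⟨hb, hba⟩
    · omega
    · rw [solutionLoop_eq a b hb hba (n.toNat + 1) n 0 (by omega) (by omega)]
      rw [if_neg hna]
      unfold gForm
      rw [PySem.Int.floordiv_eq_ediv_of_pos (by omega)]
      ring
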